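-- pv_equiv track=rewrite | github.com/EndaltsevaAR/YandexTaskPy | lectures/third_set/vocabl.py | word_in_dict
-- ===== SOURCE A (Python) =====
-- def word_in_dict(dicts, text):
--     good_words = set(dicts)
--     for word in dicts:
--         for delete_pos in range(len(word)):
--             good_words.add(word[:delete_pos] + word[delete_pos + 1:])
--     answer = []
--     for word in text:
--         if word in good_words:
--             answer.append(word)
--     return answer
-- ===== SOURCE B (Python) =====
-- def _is_one_deletion(d, w):
--     # True iff deleting exactly one character of d yields w (two-pointer check).
--     if len(d) != len(w) + 1:
--         return False
--     i = 0
--     while i < len(w) and d[i] == w[i]: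
--         i += 1
--     return d[i + 1:] == w[i:]
--
--
-- def word_in_dict(dicts, text):
--     dictset = set(dicts)
--     answer = []
--     for w in text:
--         if w in dictset:
--             answer.append(w)
--         else:
--             for d in dicts:
--                 if _is_one_deletion(d, w):
--                     answer.append(w)
--                     break
--     return answer
-- ===== Notes on version B (the rewrite author's own statement) =====
-- stated objective: alternative
-- what changed: Instead of precomputing a set of all one-deletion variants of every dictionary word, B keeps only set(dicts) and, for a text word not in it, scans the dictionary with a length-guarded two-pointer one-deletion check, breaking on the first match.
import Mathlib
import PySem

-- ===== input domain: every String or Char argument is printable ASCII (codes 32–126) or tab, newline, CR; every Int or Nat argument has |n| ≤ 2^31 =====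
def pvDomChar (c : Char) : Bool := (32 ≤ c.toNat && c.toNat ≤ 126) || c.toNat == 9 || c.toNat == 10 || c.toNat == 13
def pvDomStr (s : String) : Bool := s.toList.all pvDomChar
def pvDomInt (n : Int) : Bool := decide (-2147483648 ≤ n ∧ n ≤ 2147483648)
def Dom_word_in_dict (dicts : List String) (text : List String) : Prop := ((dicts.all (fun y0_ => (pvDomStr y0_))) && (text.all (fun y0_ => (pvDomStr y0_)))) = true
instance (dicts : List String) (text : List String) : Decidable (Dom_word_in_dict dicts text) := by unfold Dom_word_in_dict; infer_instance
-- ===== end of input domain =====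

-- B replaces A's precomputed table of all one-deletion variants by a per-word scan of the
-- dictionary with a two-pointer one-deletion check (objective: alternative algorithm).

-- ===== PORT A =====
-- word[:i] + word[i+1:], done on the code-point list (PySem string slicing is exact there).
def pvVariant (w : String) (i : Int) : String :=
  String.ofList (PySem.List.slice w.toList none (some i) ++ PySem.List.slice w.toList (some (i + 1)) none)

def word_in_dict (dicts : List String) (text : List String) : List String :=
  let good_words : PySem.Set String :=
    dicts.foldl (fun s word =>
      (PySem.List.pyRange 0 (PySem.Str.len word) 1).foldl
        (fun s delete_pos => PySem.Set.add s (pvVariant word delete_pos)) s)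
      (PySem.Set.ofList dicts)
  text.foldl (fun answer word =>
    if PySem.Set.contains good_words word then answer ++ [word] else answer) []

-- ===== PORT B =====
-- two-pointer loop of _is_one_deletion: skip the common prefix, then d[i+1:] == w[i:]
def pvOneDelGo : List Char → List Char → Bool
  | ds, [] => ds.drop 1 == []
  | [], _ :: _ => false
  | c :: ds, b :: ws => if c = b then pvOneDelGo ds ws else ds == b :: ws

def pvIsOneDeletion (d w : List Char) : Bool :=
  d.length == w.length + 1 && pvOneDelGo d w

def word_in_dict_alt (dicts : List String) (text : List String) : List String :=
  let dictset : PySem.Set String := PySem.Set.ofList dicts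
  text.foldl (fun answer w =>
    if PySem.Set.contains dictset w || dicts.any (fun d => pvIsOneDeletion d.toList w.toList)
    then answer ++ [w] else answer) []

-- ===== PRECONDITION & SPEC =====
def Spec_word_in_dict (dicts : List String) (text : List String) (out : List String) : Prop := out = word_in_dict_alt dicts text
instance (dicts : List String) (text : List String) (out : List String) : Decidable (Spec_word_in_dict dicts text out) := by unfold Spec_word_in_dict; infer_instance

-- ===== CLAIM (what is proved, stated in full; the proofs are below) =====
def Claim_equal_word_in_dict : Prop := ∀ (dicts : List String) (text : List String), Dom_word_in_dict dicts text → Spec_word_in_dict dicts text (word_in_dict dicts text)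

-- ===== LEMMAS AND PROOFS =====

-- membership in a fold of Set.add over a list
theorem pv_mem_foldl_add {ι : Type} (g : ι → String) (l : List ι) (s : PySem.Set String) (x : String) :
    x ∈ l.foldl (fun s i => PySem.Set.add s (g i)) s ↔ x ∈ s ∨ ∃ i ∈ l, x = g i := by
  induction l generalizing s with
  | nil => simp
  | cons a t ih =>
      simp only [List.foldl_cons, ih, PySem.Set.mem_add, List.mem_cons]
      constructor
      · rintro (⟨h | h⟩ | ⟨i, hi, rfl⟩)
        · exact Or.inl h
        · exact Or.inr ⟨a, Or.inl rfl, h⟩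
        · exact Or.inr ⟨i, Or.inr hi, rfl⟩
      · rintro (h | ⟨i, (rfl | hi), rfl⟩)
        · exact Or.inl (Or.inl h)
        · exact Or.inl (Or.inr rfl)
        · exact Or.inr ⟨i, hi, rfl⟩

-- membership in A's good_words set
theorem pv_mem_good (dicts : List String) (x : String) :
    x ∈ dicts.foldl (fun s word =>
        (PySem.List.pyRange 0 (PySem.Str.len word) 1).foldl
          (fun s delete_pos => PySem.Set.add s (pvVariant word delete_pos)) s)
      (PySem.Set.ofList dicts) ↔
    x ∈ dicts ∨ ∃ w ∈ dicts, ∃ i ∈ PySem.List.pyRange 0 (PySem.Str.len w) 1, x = pvVariant w i := by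
  have h : ∀ (l : List String) (s : PySem.Set String),
      x ∈ l.foldl (fun s word =>
        (PySem.List.pyRange 0 (PySem.Str.len word) 1).foldl
          (fun s delete_pos => PySem.Set.add s (pvVariant word delete_pos)) s) s ↔
      x ∈ s ∨ ∃ w ∈ l, ∃ i ∈ PySem.List.pyRange 0 (PySem.Str.len w) 1, x = pvVariant w i := by
    intro l
    induction l with
    | nil => simp
    | cons a t ih =>
        intro s
        simp only [List.foldl_cons, ih, pv_mem_foldl_add, List.mem_cons]
        constructor
        · rintro (⟨h | ⟨i, hi, rfl⟩⟩ | ⟨w, hw, hx⟩)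
          · exact Or.inl h
          · exact Or.inr ⟨a, Or.inl rfl, i, hi, rfl⟩
          · exact Or.inr ⟨w, Or.inr hw, hx⟩
        · rintro (h | ⟨w, (rfl | hw), hx⟩)
          · exact Or.inl (Or.inl h)
          · exact Or.inl (Or.inr hx)
          · exact Or.inr ⟨w, hw, hx⟩
  rw [h dicts (PySem.Set.ofList dicts), PySem.Set.mem_ofList]

-- the variant at a natural index is an eraseIdx
theorem pv_variant_eq (w : String) (k : Nat) :
    pvVariant w (k : Int) = String.ofList (w.toList.eraseIdx k) := by
  simp only [pvVariant, List.eraseIdx_eq_take_drop_succ]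
  rw [PySem.List.slice_to_natCast]
  have : ((k : Int) + 1) = ((k + 1 : Nat) : Int) := by push_cast; ring
  rw [this, PySem.List.slice_from_natCast]

-- correctness of the two-pointer loop under the length guard
theorem pv_go_iff (d w : List Char) (h : d.length = w.length + 1) :
    pvOneDelGo d w = true ↔ ∃ k, d.eraseIdx k = w := by
  induction w generalizing d with
  | nil =>
      match d, h with
      | [c], _ =>
          simp only [pvOneDelGo]
          constructor
          · intro _; exact ⟨0, rfl⟩
          · intro _; rfl
  | cons b ws ih =>
      match d, h with
      | c :: ds, h =>
          have hlen : ds.length = ws.length + 1 := by simpa using h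
          simp only [pvOneDelGo]
          split_ifs with hc
          · subst hc
            rw [ih ds hlen]
            constructor
            · rintro ⟨k, rfl⟩; exact ⟨k + 1, rfl⟩
            · rintro ⟨k, hk⟩
              match k, hk with
              | 0, hk =>
                  refine ⟨0, ?_⟩
                  simp only [List.eraseIdx] at hk ⊢
                  subst hk; rfl
              | k + 1, hk =>
                  exact ⟨k, by simpa [List.eraseIdx] using hk⟩
          · simp only [beq_iff_eq]
            constructor
            · rintro rfl; exact ⟨0, rfl⟩
            · rintro ⟨k, hk⟩
              match k, hk with
              | 0, hk => simpa [List.eraseIdx] using hk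
              | k + 1, hk =>
                  exfalso; apply hc
                  rw [List.eraseIdx_cons_succ, List.cons.injEq] at hk
                  exact hk.1

-- B's one-deletion test ↔ A's variant membership, per dictionary word
theorem pv_onedel_iff (d w : String) :
    pvIsOneDeletion d.toList w.toList = true ↔
    ∃ i ∈ PySem.List.pyRange 0 (PySem.Str.len d) 1, w = pvVariant d i := by
  simp only [pvIsOneDeletion, Bool.and_eq_true, beq_iff_eq]
  constructor
  · rintro ⟨hlen, hgo⟩
    obtain ⟨k, hk⟩ := (pv_go_iff _ _ hlen).1 hgo
    have hklt : k < d.toList.length := by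
      by_contra hge
      rw [List.eraseIdx_of_length_le (le_of_not_gt hge)] at hk
      have := congrArg List.length hk
      omega
    refine ⟨(k : Int), ?_, ?_⟩
    · rw [PySem.List.mem_pyRange_one, PySem.Str.len_eq]
      exact ⟨Int.natCast_nonneg k, by exact_mod_cast hklt⟩
    · rw [pv_variant_eq, hk, String.ofList_toList]
  · rintro ⟨i, hi, hw⟩
    rw [PySem.List.mem_pyRange_one, PySem.Str.len_eq] at hi
    obtain ⟨h0, hlt⟩ := hi
    obtain ⟨k, rfl⟩ := Int.eq_ofNat_of_zero_le h0
    have hklt : k < d.toList.length := by exact_mod_cast hlt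
    rw [pv_variant_eq] at hw
    have hwl : w.toList = d.toList.eraseIdx k := by
      rw [hw, String.toList_ofList]
    have hlen : d.toList.length = w.toList.length + 1 := by
      rw [hwl, List.length_eraseIdx, if_pos hklt]; omega
    exact ⟨hlen, (pv_go_iff _ _ hlen).2 ⟨k, hwl.symm⟩⟩

-- the two filters agree word for word
theorem pv_test_eq (dicts : List String) (w : String) :
    PySem.Set.contains
      (dicts.foldl (fun s word =>
        (PySem.List.pyRange 0 (PySem.Str.len word) 1).foldl
          (fun s delete_pos => PySem.Set.add s (pvVariant word delete_pos)) s)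
        (PySem.Set.ofList dicts)) w =
    (PySem.Set.contains (PySem.Set.ofList dicts) w ||
      dicts.any (fun d => pvIsOneDeletion d.toList w.toList)) := by
  rcases Bool.eq_false_or_eq_true (PySem.Set.contains
      (dicts.foldl (fun s word =>
        (PySem.List.pyRange 0 (PySem.Str.len word) 1).foldl
          (fun s delete_pos => PySem.Set.add s (pvVariant word delete_pos)) s)
        (PySem.Set.ofList dicts)) w) with h | h <;> rw [h]
  · symm
    rw [Bool.or_eq_true]
    have hmem := (PySem.Set.contains_iff _ _).1 h
    rw [pv_mem_good] at hmem
    rcases hmem with hmem | ⟨d, hd, i, hi, hw⟩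
    · exact Or.inl ((PySem.Set.contains_iff _ _).2 ((PySem.Set.mem_ofList _ _).2 hmem))
    · exact Or.inr (List.any_eq_true.2 ⟨d, hd, (pv_onedel_iff d w).2 ⟨i, hi, hw⟩⟩)
  · symm
    rw [Bool.or_eq_false_iff]
    have hnot : ¬ (w ∈ dicts ∨ ∃ d ∈ dicts, ∃ i ∈ PySem.List.pyRange 0 (PySem.Str.len d) 1,
        w = pvVariant d i) := by
      rw [← pv_mem_good, ← PySem.Set.contains_iff, h]
      simp
    constructor
    · rw [← Bool.not_eq_true, PySem.Set.contains_iff, PySem.Set.mem_ofList]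
      intro hmem; exact hnot (Or.inl hmem)
    · rw [← Bool.not_eq_true, List.any_eq_true]
      rintro ⟨d, hd, hone⟩
      obtain ⟨i, hi, hw⟩ := (pv_onedel_iff d w).1 hone
      exact hnot (Or.inr ⟨d, hd, i, hi, hw⟩)

-- ===== VERDICT (by name: the statement is the Claim_ definition above) =====
theorem word_in_dict_spec : Claim_equal_word_in_dict := by
  intro dicts text _
  unfold Spec_word_in_dict word_in_dict word_in_dict_alt
  rw [PySem.List.foldl_append_if_eq_filter, PySem.List.foldl_append_if_eq_filter]
  congr 1
  apply List.filter_congr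
  intro w _
  exact pv_test_eq dicts w
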